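-- pv_equiv track=rewrite | github.com/wummel/linkchecker | linkcheck/better_exchook2.py | parse_py_statement
-- ===== SOURCE A (Python) =====
-- def parse_py_statement(line):
-- 	state = 0
-- 	curtoken = ""
-- 	spaces = " \t\n"
-- 	ops = ".,;:+-*/%&=|(){}[]^<>"
-- 	i = 0
-- 	def _escape_char(c):
-- 		if c == "n": return "\n"
-- 		elif c == "t": return "\t"
-- 		else: return c
-- 	while i < len(line):
-- 		c = line[i]
-- 		i += 1
-- 		if state == 0:
-- 			if c in spaces: pass
-- 			elif c in ops: yield ("op", c)
-- 			elif c == "#": state = 6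
-- 			elif c == "\"": state = 1
-- 			elif c == "'": state = 2
-- 			else:
-- 				curtoken = c
-- 				state = 3
-- 		elif state == 1: # string via "
-- 			if c == "\\": state = 4
-- 			elif c == "\"":
-- 				yield ("str", curtoken)
-- 				curtoken = ""
-- 				state = 0
-- 			else: curtoken += c
-- 		elif state == 2: # string via '
-- 			if c == "\\": state = 5
-- 			elif c == "'":
-- 				yield ("str", curtoken)
-- 				curtoken = ""
-- 				state = 0
-- 			else: curtoken += c
-- 		elif state == 3: # identifier
-- 			if c in spaces + ops + "#\"'":
-- 				yield ("id", curtoken)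
-- 				curtoken = ""
-- 				state = 0
-- 				i -= 1
-- 			else: curtoken += c
-- 		elif state == 4: # escape in "
-- 			curtoken += _escape_char(c)
-- 			state = 1
-- 		elif state == 5: # escape in '
-- 			curtoken += _escape_char(c)
-- 			state = 2
-- 		elif state == 6: # comment
-- 			curtoken += c
-- 	if state == 3: yield ("id", curtoken)
-- 	elif state == 6: yield ("comment", curtoken)
-- ===== SOURCE B (Python) =====
-- def parse_py_statement(line):
-- 	# dispatch + consume scanner: one index, inner consumer loops, no state variable and no pushback
-- 	spaces = " \t\n"
-- 	ops = ".,;:+-*/%&=|(){}[]^<>"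
-- 	stop = spaces + ops + "#\"'"
-- 	n = len(line)
-- 	i = 0
-- 	while i < n:
-- 		c = line[i]
-- 		i += 1
-- 		if c in spaces:
-- 			continue
-- 		if c in ops:
-- 			yield ("op", c)
-- 		elif c == "#":
-- 			yield ("comment", line[i:])
-- 			i = n
-- 		elif c == '"' or c == "'":
-- 			tok = ""
-- 			while i < n:
-- 				ch = line[i]
-- 				i += 1
-- 				if ch == c:
-- 					yield ("str", tok)
-- 					break
-- 				if ch == "\\":
-- 					if i < n:
-- 						e = line[i]
-- 						i += 1
-- 						tok += "\n" if e == "n" else "\t" if e == "t" else e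
-- 					# backslash at end of line: string unterminated, nothing yielded
-- 				else:
-- 					tok += ch
-- 		else:
-- 			j = i
-- 			while j < n and line[j] not in stop:
-- 				j += 1
-- 			yield ("id", line[i - 1:j])
-- 			i = j
-- ===== Notes on version B (the rewrite author's own statement) =====
-- stated objective: simpler
-- what changed: Replaces A's explicit 6-state machine with integer state variable and i -= 1 pushback by a dispatch+consume scanner: the outer loop dispatches on the current character and inner consumer loops eat a whole string/comment/identifier token at once (comments and identifiers taken by one slice), so no state variable and no pushback are needed.
import Mathlib
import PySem

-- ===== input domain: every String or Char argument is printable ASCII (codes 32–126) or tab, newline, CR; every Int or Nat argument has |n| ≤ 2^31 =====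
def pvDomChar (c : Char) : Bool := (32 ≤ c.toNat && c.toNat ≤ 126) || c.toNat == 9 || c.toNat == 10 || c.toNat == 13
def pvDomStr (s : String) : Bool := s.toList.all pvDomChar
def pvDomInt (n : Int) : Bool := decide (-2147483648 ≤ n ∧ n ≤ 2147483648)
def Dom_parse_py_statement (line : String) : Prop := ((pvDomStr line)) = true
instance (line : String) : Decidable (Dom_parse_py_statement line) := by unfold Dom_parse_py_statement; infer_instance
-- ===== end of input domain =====

-- B re-decomposes A's explicit 6-state machine (with pushback i -= 1) into a dispatch+consume
-- scanner with inner consumer loops; objective: simpler, same cost. Equality is about the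
-- list of yielded tokens.

-- ===== PORT A =====
def pySpaces : List Char := [' ', '\t', '\n']
def pyOps : List Char := ['.', ',', ';', ':', '+', '-', '*', '/', '%', '&', '=', '|', '(', ')', '{', '}', '[', ']', '^', '<', '>']

def pyEscapeChar (c : Char) : Char :=
  if c = 'n' then '\n' else if c = 't' then '\t' else c

-- the while loop of A: state, curtoken, remaining input; 'i -= 1' in state 3 is the re-cons of c
def parsePyGo : Nat → List Char → List Char → List (String × String)
  | state, curtoken, [] =>
      if state = 3 then [("id", String.mk curtoken)]
      else if state = 6 then [("comment", String.mk curtoken)]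
      else []
  | state, curtoken, c :: rest =>
      if state = 0 then
        if c ∈ pySpaces then parsePyGo 0 curtoken rest
        else if c ∈ pyOps then ("op", String.mk [c]) :: parsePyGo 0 curtoken rest
        else if c = '#' then parsePyGo 6 curtoken rest
        else if c = '"' then parsePyGo 1 curtoken rest
        else if c = '\'' then parsePyGo 2 curtoken rest
        else parsePyGo 3 [c] rest
      else if state = 1 then
        if c = '\\' then parsePyGo 4 curtoken rest
        else if c = '"' then ("str", String.mk curtoken) :: parsePyGo 0 [] rest
        else parsePyGo 1 (curtoken ++ [c]) rest
      else if state = 2 then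
        if c = '\\' then parsePyGo 5 curtoken rest
        else if c = '\'' then ("str", String.mk curtoken) :: parsePyGo 0 [] rest
        else parsePyGo 2 (curtoken ++ [c]) rest
      else if state = 3 then
        if c ∈ pySpaces ++ pyOps ++ ['#', '"', '\''] then
          ("id", String.mk curtoken) :: parsePyGo 0 [] (c :: rest)
        else parsePyGo 3 (curtoken ++ [c]) rest
      else if state = 4 then parsePyGo 1 (curtoken ++ [pyEscapeChar c]) rest
      else if state = 5 then parsePyGo 2 (curtoken ++ [pyEscapeChar c]) rest
      else parsePyGo 6 (curtoken ++ [c]) rest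
termination_by state _ l => 2 * l.length + (if state = 3 then 1 else 0)
decreasing_by all_goals first
  | (simp_all; omega)
  | simp_all

def parse_py_statement (line : String) : List (String × String) :=
  parsePyGo 0 [] line.toList

-- ===== PORT B =====
def altSpaces : List Char := [' ', '\t', '\n']
def altOps : List Char := ['.', ',', ';', ':', '+', '-', '*', '/', '%', '&', '=', '|', '(', ')', '{', '}', '[', ']', '^', '<', '>']
def altStop : List Char := altSpaces ++ altOps ++ ['#', '"', '\'']

def altEscape (e : Char) : Char :=
  if e = 'n' then '\n' else if e = 't' then '\t' else e

-- inner string-consumer loop: returns the token and the rest, or none if the string never closes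
def altScanStr (q : Char) : List Char → List Char → Option (String × List Char)
  | tok, [] => none
  | tok, ch :: rest =>
      if ch = q then some (String.mk tok, rest)
      else if ch = '\\' then
        match rest with
        | [] => none
        | e :: rest' => altScanStr q (tok ++ [altEscape e]) rest'
      else altScanStr q (tok ++ [ch]) rest

-- inner identifier-consumer loop: consume until a stop char, which is left in place
def altScanId : List Char → List Char → List Char × List Char
  | tok, [] => (tok, [])
  | tok, ch :: rest =>
      if ch ∈ altStop then (tok, ch :: rest)
      else altScanId (tok ++ [ch]) rest

theorem altScanStr_len (q : Char) (tok l : List Char) :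
    ∀ t r, altScanStr q tok l = some (t, r) → r.length ≤ l.length := by
  fun_induction altScanStr q tok l <;> intro t r h <;> simp_all <;> try omega
  all_goals (rename_i ih _ _; have := ih _ _ h; simp_all; omega)

theorem altScanId_len (tok l : List Char) : (altScanId tok l).2.length ≤ l.length := by
  fun_induction altScanId tok l <;> simp_all <;> omega

-- the outer dispatch loop of B
def altGo : List Char → List (String × String)
  | [] => []
  | c :: rest =>
      if c ∈ altSpaces then altGo rest
      else if c ∈ altOps then ("op", String.mk [c]) :: altGo rest
      else if c = '#' then [("comment", String.mk rest)]
      else if c = '"' ∨ c = '\'' then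
        match h : altScanStr c [] rest with
        | some (tok, rest') => ("str", tok) :: altGo rest'
        | none => []
      else
        ("id", String.mk (altScanId [c] rest).1) :: altGo (altScanId [c] rest).2
termination_by l => l.length
decreasing_by
  · simp
  · simp
  · have := altScanStr_len c [] rest _ _ h; simp; omega
  · have := altScanId_len [c] rest; simp; omega

def parse_py_statement_alt (line : String) : List (String × String) :=
  altGo line.toList

-- ===== PRECONDITION & SPEC =====
def Spec_parse_py_statement (line : String) (out : List (String × String)) : Prop := out = parse_py_statement_alt line
instance (line : String) (out : List (String × String)) : Decidable (Spec_parse_py_statement line out) := by unfold Spec_parse_py_statement; infer_instance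

-- ===== CLAIM (what is proved, stated in full; the proofs are below) =====
def Claim_equal_parse_py_statement : Prop := ∀ (line : String), Dom_parse_py_statement line → Spec_parse_py_statement line (parse_py_statement line)

-- ===== LEMMAS AND PROOFS =====

theorem comment_lemma : ∀ (l cur : List Char), parsePyGo 6 cur l = [("comment", String.mk (cur ++ l))] := by
  intro l
  induction l with
  | nil => intro cur; simp [parsePyGo]
  | cons c rest ih => intro cur; simp [parsePyGo, ih (cur ++ [c])]

def strRes (q : Char) (cur l : List Char) : List (String × String) :=
  match altScanStr q cur l with
  | some (tok, rest') => ("str", tok) :: altGo rest'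
  | none => []

theorem strRes_cons (q c : Char) (cur rest : List Char) :
    strRes q cur (c :: rest) =
      if c = q then ("str", String.mk cur) :: altGo rest
      else if c = '\\' then
        (match rest with
         | [] => []
         | e :: r => strRes q (cur ++ [altEscape e]) r)
      else strRes q (cur ++ [c]) rest := by
  unfold strRes
  rw [altScanStr.eq_def]
  by_cases h1 : c = q
  · simp [h1]
  · simp only [h1, if_false]
    by_cases h2 : c = '\\'
    · simp only [h2, if_true]
      match rest with
      | [] => rfl
      | e :: r => rfl
    · simp [h2]

theorem main_lemma : ∀ n (l : List Char),
    (2 * l.length < n → parsePyGo 0 [] l = altGo l)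
    ∧ (2 * l.length + 1 < n → ∀ cur, parsePyGo 3 cur l =
        ("id", String.mk (altScanId cur l).1) :: altGo (altScanId cur l).2)
    ∧ (2 * l.length < n → ∀ cur, parsePyGo 1 cur l = strRes '"' cur l)
    ∧ (2 * l.length < n → ∀ cur, parsePyGo 2 cur l = strRes '\'' cur l) := by
  intro n
  induction n using Nat.strong_induction_on with
  | _ n ih =>
    have L0r : ∀ (l : List Char), 2 * l.length + 1 < n → parsePyGo 0 [] l = altGo l :=
      fun l h => (ih (2 * l.length + 1) h l).1 (by omega)
    have L3r : ∀ (l : List Char), 2 * l.length + 2 < n → ∀ cur, parsePyGo 3 cur l =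
        ("id", String.mk (altScanId cur l).1) :: altGo (altScanId cur l).2 :=
      fun l h => (ih (2 * l.length + 2) h l).2.1 (by omega)
    have L1r : ∀ (l : List Char), 2 * l.length + 1 < n → ∀ cur, parsePyGo 1 cur l = strRes '"' cur l :=
      fun l h => (ih (2 * l.length + 1) h l).2.2.1 (by omega)
    have L2r : ∀ (l : List Char), 2 * l.length + 1 < n → ∀ cur, parsePyGo 2 cur l = strRes '\'' cur l :=
      fun l h => (ih (2 * l.length + 1) h l).2.2.2 (by omega)
    intro l
    match l with
    | [] =>
      refine ⟨fun _ => ?_, fun _ cur => ?_, fun _ cur => ?_, fun _ cur => ?_⟩ <;>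
        simp [parsePyGo, altGo, altScanId, altScanStr, strRes]
    | c :: rest =>
      refine ⟨fun hn => ?_, fun hn cur => ?_, fun hn cur => ?_, fun hn cur => ?_⟩
      · -- state 0  vs  altGo dispatch
        rw [parsePyGo, altGo]
        norm_num [show pySpaces = altSpaces from rfl, show pyOps = altOps from rfl]
        by_cases h1 : c ∈ altSpaces
        · simp only [h1, if_true]
          exact L0r rest (by simp at hn ⊢; omega)
        · simp only [h1, if_false]
          by_cases h2 : c ∈ altOps
          · simp only [h2, if_true]
            exact congrArg _ (L0r rest (by simp at hn ⊢; omega))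
          · simp only [h2, if_false]
            by_cases h3 : c = '#'
            · simp [h3, comment_lemma]
            · simp only [h3, if_false]
              by_cases h4 : c = '"'
              · subst h4
                simp only [if_true, true_or]
                rw [L1r rest (by simp at hn ⊢; omega) [], strRes.eq_def]
                rcases hsc : altScanStr '"' [] rest with _ | ⟨tok, r⟩ <;> simp [hsc]
              · simp only [h4, if_false]
                by_cases h5 : c = '\''
                · subst h5
                  simp only [if_true, or_true]
                  rw [L2r rest (by simp at hn ⊢; omega) [], strRes.eq_def]
                  rcases hsc : altScanStr '\'' [] rest with _ | ⟨tok, r⟩ <;> simp [hsc]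
                · simp only [h5, if_false, or_self]
                  exact L3r rest (by simp at hn ⊢; omega) [c]
      · -- state 3  vs  altScanId
        rw [parsePyGo, altScanId]
        norm_num [show pySpaces ++ pyOps ++ ['#', '"', '\''] = altStop from rfl]
        by_cases h1 : c ∈ altStop
        · simp only [h1, if_true]
          exact congrArg _ (L0r (c :: rest) (by simp at hn ⊢; omega))
        · simp only [h1, if_false]
          exact L3r rest (by simp at hn ⊢; omega) (cur ++ [c])
      · -- state 1  vs  altScanStr with quote "
        rw [parsePyGo, strRes_cons]
        norm_num
        by_cases hb : c = '\\'
        · subst hb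
          simp only [if_true, if_neg (show ('\\' : Char) ≠ '"' by decide)]
          match rest with
          | [] => rw [parsePyGo]; simp
          | e :: r =>
            rw [parsePyGo]
            norm_num [show pyEscapeChar = altEscape from rfl]
            exact L1r r (by simp at hn ⊢; omega) (cur ++ [altEscape e])
        · simp only [hb, if_false]
          by_cases h2 : c = '"'
          · subst h2
            simp only [if_true]
            exact congrArg _ (L0r rest (by simp at hn ⊢; omega))
          · simp only [h2, if_false]
            exact L1r rest (by simp at hn ⊢; omega) (cur ++ [c])
      · -- state 2  vs  altScanStr with quote '
        rw [parsePyGo, strRes_cons]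
        norm_num
        by_cases hb : c = '\\'
        · subst hb
          simp only [if_true, if_neg (show ('\\' : Char) ≠ '\'' by decide)]
          match rest with
          | [] => rw [parsePyGo]; simp
          | e :: r =>
            rw [parsePyGo]
            norm_num [show pyEscapeChar = altEscape from rfl]
            exact L2r r (by simp at hn ⊢; omega) (cur ++ [altEscape e])
        · simp only [hb, if_false]
          by_cases h2 : c = '\''
          · subst h2
            simp only [if_true]
            exact congrArg _ (L0r rest (by simp at hn ⊢; omega))
          · simp only [h2, if_false]
            exact L2r rest (by simp at hn ⊢; omega) (cur ++ [c])

theorem parse_py_statement_spec : Claim_equal_parse_py_statement := by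
  intro line _
  unfold Spec_parse_py_statement parse_py_statement parse_py_statement_alt
  exact (main_lemma (2 * line.toList.length + 1) line.toList).1 (by omega)
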